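-- pv_equiv track=rewrite | github.com/ao-spirogyra/Cipher | decode.py | splitTextToGroup
-- ===== SOURCE A (Python) =====
-- def splitTextToGroup(text,length_of_key):
--     #split text into each group stepped by length of the key
--     text_list = list(text)
--     group = [[""]*((len(text)//length_of_key) + 1) for i in [0]*length_of_key]
--     for i in range(length_of_key):
--         x = 0
--         for l in range(i,len(text_list) + 1,length_of_key):
--             try:
--                 group[i][x] = text_list[l]
--                 x += 1
--             except LookupError as e:
--                 if (group[i][x] == ""):
--                     break
--     return group
-- ===== SOURCE B (Python) =====
-- def splitTextToGroup(text, length_of_key):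
--     # Stride slicing: row i is simply text[i::length_of_key]; then pad every
--     # row with "" up to the fixed width len(text)//length_of_key + 1.
--     rows = [list(text[i::length_of_key]) for i in range(length_of_key)]
--     return [row + [""] * (len(text) // length_of_key + 1 - len(row)) for row in rows]
-- ===== Notes on version B (the rewrite author's own statement) =====
-- stated objective: idiomatic
-- what changed: A fills a prefilled k-by-(n//k+1) grid with two nested index loops, mutation and an IndexError-swallowing try/except; B never loops over characters at all: row i is the stride slice text[i::length_of_key] and each row is then padded with "" to the fixed width, so the strided extraction is done by the slicing primitive instead of index bookkeeping.
import Mathlib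
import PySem

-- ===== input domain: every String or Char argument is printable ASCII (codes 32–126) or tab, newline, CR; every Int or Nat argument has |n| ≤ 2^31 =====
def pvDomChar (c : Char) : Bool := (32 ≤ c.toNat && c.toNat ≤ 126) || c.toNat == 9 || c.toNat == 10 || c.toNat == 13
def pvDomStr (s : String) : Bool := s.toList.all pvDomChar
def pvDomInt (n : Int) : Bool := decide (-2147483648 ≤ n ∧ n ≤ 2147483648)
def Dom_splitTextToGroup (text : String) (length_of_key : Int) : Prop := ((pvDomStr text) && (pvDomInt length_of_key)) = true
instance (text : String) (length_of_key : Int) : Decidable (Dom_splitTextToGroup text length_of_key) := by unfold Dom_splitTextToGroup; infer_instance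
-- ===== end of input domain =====

-- B replaces A's nested mutation loops with try/except by stride slicing
-- (row i = text[i::length_of_key], padded with "" to the fixed width): more idiomatic, same O(n) cost.


-- ===== PORT A =====
-- inner loop 'for l in range(i, len(text_list)+1, length_of_key)' with state (group, x);
-- 'group[i][x] = text_list[l]' is: evaluate RHS (IndexError → except), then the target
-- (LookupError → except); the except handler reads group[i][x] and breaks if it is ""
-- (a LookupError raised inside the handler itself would propagate: the 'none' fallback
-- returns the grid unchanged; that state is unreachable for the grids A builds).
def pvInnerA (textList : List Char) (i : Int) (ls : List Int) (g : List (List String)) (x : Int) :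
    List (List String) :=
  match ls with
  | [] => g
  | l :: rest =>
    match PySem.List.pyGet? textList l with
    | some c =>
      match (PySem.List.pyGet? g i).bind (fun row => PySem.List.pySet? row x (String.ofList [c])) with
      | some row' => pvInnerA textList i rest (PySem.List.pySetD g i row') (x + 1)
      | none =>
        match (PySem.List.pyGet? g i).bind (fun row => PySem.List.pyGet? row x) with
        | some s => if s == "" then g else pvInnerA textList i rest g x
        | none => g
    | none =>
      match (PySem.List.pyGet? g i).bind (fun row => PySem.List.pyGet? row x) with
      | some s => if s == "" then g else pvInnerA textList i rest g x
      | none => g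

def splitTextToGroup (text : String) (length_of_key : Int) : List (List String) :=
  let text_list := text.toList
  -- group = [[""]*((len(text)//length_of_key)+1) for i in [0]*length_of_key]
  -- ([0]*k and [""]*k are [] for k ≤ 0, which Int.toNat matches; for length_of_key ≤ 0
  -- the comprehension body — and hence len(text)//length_of_key — is never evaluated in
  -- Python, and here the map over the empty list never applies its function either)
  let group := (List.replicate length_of_key.toNat (0 : Int)).map
    (fun _ => List.replicate (PySem.Int.floordiv (text_list.length : Int) length_of_key + 1).toNat "")
  (PySem.List.pyRange 0 length_of_key 1).foldl
    (fun g i => pvInnerA text_list i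
        (PySem.List.pyRange i ((text_list.length : Int) + 1) length_of_key) g 0)
    group

-- ===== PORT B =====
-- rows = [list(text[i::length_of_key]) for i in range(length_of_key)]
-- return [row + [""]*(len(text)//length_of_key + 1 - len(row)) for row in rows]
-- (slice? is none only for step 0; then range(length_of_key) is empty, so as in
-- Python itself that branch — the '.getD []' — is never taken; likewise the division
-- is only evaluated when a row exists, i.e. length_of_key ≥ 1)
def splitTextToGroup_alt (text : String) (length_of_key : Int) : List (List String) :=
  let tl := text.toList
  let rows := (PySem.List.pyRange 0 length_of_key 1).map (fun i =>
    ((PySem.List.slice? tl (some i) none length_of_key).getD []).map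
      (fun c => String.ofList [c]))
  rows.map (fun row =>
    row ++ List.replicate
      (PySem.Int.floordiv (tl.length : Int) length_of_key + 1 - (row.length : Int)).toNat "")

-- ===== PRECONDITION & SPEC =====
def Spec_splitTextToGroup (text : String) (length_of_key : Int) (out : List (List String)) : Prop := out = splitTextToGroup_alt text length_of_key
instance (text : String) (length_of_key : Int) (out : List (List String)) : Decidable (Spec_splitTextToGroup text length_of_key out) := by unfold Spec_splitTextToGroup; infer_instance

-- ===== CLAIM (what is proved, stated in full; the proofs are below) =====
def Claim_equal_splitTextToGroup : Prop := ∀ (text : String) (length_of_key : Int), Dom_splitTextToGroup text length_of_key → Spec_splitTextToGroup text length_of_key (splitTextToGroup text length_of_key)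

-- ===== LEMMAS AND PROOFS =====

-- the one-character string A stores (and B's slice produces) for an in-range index
def pvChAt (tl : List Char) (idx : Int) : String :=
  ((PySem.List.pyGet? tl idx).map (fun c => String.ofList [c])).getD ""

-- the finished row for stride class i
def pvRow (tl : List Char) (L i : Int) (w : Nat) : List String :=
  (List.range w).map (fun (j : Nat) =>
    if i + (j : Int) * L < (tl.length : Int) then pvChAt tl (i + (j : Int) * L) else "")

-- the row after x successful assignments of A's inner loop
def pvPartial (tl : List Char) (L i : Int) (w x : Nat) : List String :=
  (List.range w).map (fun (j : Nat) => if j < x then pvChAt tl (i + (j : Int) * L) else "")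

lemma pvSet_self {α : Type} (xs : List α) (k : Nat) (v : α) (h : xs[k]? = some v) :
    xs.set k v = xs := by
  apply List.ext_getElem?
  intro j
  by_cases hj : j = k
  · subst hj
    rw [List.getElem?_set_self (List.getElem?_eq_some_iff.1 h).1, h]
  · rw [List.getElem?_set_ne (fun he => hj he.symm)]

-- range(a, b, s) for a positive step s that is not necessarily 1
lemma pvRange_pos_cons (a b s : Int) (hs : 0 < s) (hab : a < b) :
    PySem.List.pyRange a b s = a :: PySem.List.pyRange (a + s) b s := by
  rw [PySem.List.pyRange_of_pos a b hs, PySem.List.pyRange_of_pos (a + s) b hs]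
  by_cases h2 : a + s < b
  · have hcount : (b - a + s - 1) / s = (b - (a + s) + s - 1) / s + 1 := by
      have he : b - a + s - 1 = (b - (a + s) + s - 1) + 1 * s := by ring
      rw [he, Int.add_mul_ediv_right _ _ (by omega : s ≠ 0)]
    have hx0 : 0 ≤ (b - (a + s) + s - 1) / s := Int.ediv_nonneg (by omega) (by omega)
    simp only [hab, if_pos, h2, hcount]
    have ht : ((b - (a + s) + s - 1) / s + 1).toNat = ((b - (a + s) + s - 1) / s).toNat + 1 := by
      omega
    rw [ht, List.range_succ_eq_map, List.map_cons, List.map_map]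
    refine List.cons_eq_cons.2 ⟨by simp, ?_⟩
    apply List.map_congr_left
    intro k _
    simp [Function.comp, Nat.succ_eq_add_one]
    ring
  · have h1 : (b - a + s - 1) / s = 1 := by
      have hge : 1 ≤ (b - a + s - 1) / s := (Int.le_ediv_iff_mul_le hs).2 (by omega)
      have hlt : (b - a + s - 1) / s < 2 := (Int.ediv_lt_iff_lt_mul hs).2 (by omega)
      omega
    simp only [hab, if_pos, h2, h1]
    simp

lemma pvRange_pos_nil (a b s : Int) (hs : 0 < s) (hab : b ≤ a) :
    PySem.List.pyRange a b s = [] := by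
  rw [PySem.List.pyRange_of_pos a b hs]
  simp [show ¬ a < b by omega]

-- any x with i + x*L still inside the text fits in the padded width n//L + 1
lemma pvXltW (L i : Int) (n : Nat) (hL : 1 ≤ L) (hi : 0 ≤ i) (x : Nat)
    (h : i + (x : Int) * L ≤ (n : Int)) : x < n / L.toNat + 1 := by
  have hLn : (L.toNat : Int) = L := Int.toNat_of_nonneg (by omega)
  have h1 : (x : Int) * L ≤ (n : Int) := by linarith
  have h2 : x * L.toNat ≤ n := by
    have : ((x * L.toNat : Nat) : Int) ≤ (n : Int) := by push_cast; rw [hLn]; exact h1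
    exact_mod_cast this
  exact Nat.lt_succ_of_le ((Nat.le_div_iff_mul_le (by omega)).2 h2)

lemma pvPartial_eq_row (tl : List Char) (L i : Int) (w x : Nat)
    (h : ∀ j : Nat, j < w → (j < x ↔ i + (j : Int) * L < (tl.length : Int))) :
    pvPartial tl L i w x = pvRow tl L i w := by
  unfold pvPartial pvRow
  apply List.map_congr_left
  intro j hj
  rw [List.mem_range] at hj
  by_cases hx : j < x
  · simp [hx, (h j hj).1 hx]
  · rw [if_neg hx, if_neg (fun hc => hx ((h j hj).2 hc))]

lemma pvPartial_succ (tl : List Char) (L i : Int) (w x : Nat) (_hx : x < w) :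
    (pvPartial tl L i w x).set x (pvChAt tl (i + (x : Int) * L)) = pvPartial tl L i w (x + 1) := by
  apply List.ext_getElem
  · simp [pvPartial]
  · intro j h1 h2
    simp only [pvPartial, List.length_map, List.length_range] at h1 h2
    rw [List.getElem_set]
    by_cases hj : x = j
    · subst hj
      simp [pvPartial, List.getElem_map]
    · simp only [if_neg hj, pvPartial, List.getElem_map, List.getElem_range]
      by_cases hlt : j < x
      · simp [hlt, show j < x + 1 by omega]
      · simp [hlt, show ¬ (j < x + 1) by omega]

lemma pvInner_spec (tl : List Char) (L i : Int) (hL : 1 ≤ L) (hi : 0 ≤ i) :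
    ∀ (fuel x : Nat) (g : List (List String)),
      tl.length / L.toNat + 1 - x ≤ fuel →
      g[i.toNat]? = some (pvPartial tl L i (tl.length / L.toNat + 1) x) →
      (∀ j : Nat, j < x → i + (j : Int) * L < (tl.length : Int)) →
      pvInnerA tl i (PySem.List.pyRange (i + (x : Int) * L) ((tl.length : Int) + 1) L) g (x : Int)
        = g.set i.toNat (pvRow tl L i (tl.length / L.toNat + 1)) := by
  intro fuel
  induction fuel with
  | zero =>
    intro x g hfuel hg hinv
    set n := tl.length with hn
    set w := n / L.toNat + 1 with hw
    have hxw : w ≤ x := by omega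
    have hLt : 0 < L.toNat := by omega
    have hdm := Nat.div_add_mod' n L.toNat
    have hmod := Nat.mod_lt n hLt
    have hnw : n < w * L.toNat := by
      rw [hw, Nat.succ_mul]
      omega
    have hLn : (L.toNat : Int) = L := Int.toNat_of_nonneg (by omega)
    have hstart : (n : Int) + 1 ≤ i + (x : Int) * L := by
      have hwx : (w : Int) ≤ (x : Int) := by exact_mod_cast hxw
      have hnw' : (n : Int) < (w : Int) * L := by
        have h2 : ((n : Nat) : Int) < ((w * L.toNat : Nat) : Int) := by exact_mod_cast hnw
        push_cast [hLn] at h2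
        exact h2
      have h3 : (w : Int) * L ≤ (x : Int) * L :=
        mul_le_mul_of_nonneg_right hwx (by omega)
      omega
    rw [pvRange_pos_nil _ _ _ (by omega) hstart]
    have heq : pvPartial tl L i w x = pvRow tl L i w := by
      apply pvPartial_eq_row
      intro j hj
      constructor
      · exact hinv j
      · intro _; omega
    rw [pvInnerA]
    exact (pvSet_self g i.toNat _ (heq ▸ hg)).symm
  | succ fuel ih =>
    intro x g hfuel hg hinv
    set n := tl.length with hn
    set w := n / L.toNat + 1 with hw
    by_cases hxl : i + (x : Int) * L ≤ (n : Int)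
    · have hxw : x < w := pvXltW L i n hL hi x hxl
      have higl : i.toNat < g.length := by
        have := List.getElem?_eq_some_iff.1 hg
        exact this.1
      rw [pvRange_pos_cons _ _ _ (by omega) (by omega)]
      have hix : i = ((i.toNat : Nat) : Int) := (Int.toNat_of_nonneg hi).symm
      by_cases hlt : i + (x : Int) * L < (n : Int)
      · -- successful assignment
        have hm : i + (x : Int) * L = (((i + (x : Int) * L).toNat : Nat) : Int) :=
          (Int.toNat_of_nonneg (by positivity)).symm
        have hmlt : (i + (x : Int) * L).toNat < tl.length := by omega
        have hgetc : PySem.List.pyGet? tl (i + (x : Int) * L)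
            = some (tl[(i + (x : Int) * L).toNat]'hmlt) := by
          conv_lhs => rw [hm]
          rw [PySem.List.pyGet?_natCast]
          exact List.getElem?_eq_getElem hmlt
        have hgeti : PySem.List.pyGet? g i = some (pvPartial tl L i w x) := by
          conv_lhs => rw [hix]
          rw [PySem.List.pyGet?_natCast]
          exact hg
        have hlenrow : (pvPartial tl L i w x).length = w := by
          simp [pvPartial]
        have hset : PySem.List.pySet? (pvPartial tl L i w x) (x : Int)
            (String.ofList [tl[(i + (x : Int) * L).toNat]'hmlt])
            = some ((pvPartial tl L i w x).set x (String.ofList [tl[(i + (x : Int) * L).toNat]'hmlt])) := by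
          rw [PySem.List.pySet?_natCast _ _ _ (by omega)]
        rw [pvInnerA]
        simp only [hgetc, hgeti, Option.bind_some, hset]
        have hch : String.ofList [tl[(i + (x : Int) * L).toNat]] = pvChAt tl (i + (x : Int) * L) := by
          simp [pvChAt, hgetc]
        rw [hch, pvPartial_succ tl L i w x hxw]
        rw [PySem.List.pySetD_of_nonneg _ _ hi]
        have harg : i + (x : Int) * L + L = i + ((x + 1 : Nat) : Int) * L := by push_cast; ring
        have hxx : (x : Int) + 1 = ((x + 1 : Nat) : Int) := by push_cast; ring
        rw [harg, hxx]
        rw [ih (x + 1) (g.set i.toNat (pvPartial tl L i w (x + 1))) (by omega)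
          (by rw [List.getElem?_set_self (by omega)])
          (by intro j hj
              by_cases hjx : j < x
              · exact hinv j hjx
              · have : j = x := by omega
                subst this; exact hlt)]
        rw [List.set_set]
      · -- l = n: IndexError on text_list[l], handler sees "" and breaks
        have hxeq : i + (x : Int) * L = (n : Int) := by omega
        have hgetc : PySem.List.pyGet? tl (i + (x : Int) * L) = none := by
          rw [hxeq, PySem.List.pyGet?_natCast, List.getElem?_eq_none]; omega
        have hgeti : PySem.List.pyGet? g i = some (pvPartial tl L i w x) := by
          conv_lhs => rw [hix]
          rw [PySem.List.pyGet?_natCast]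
          exact hg
        have hrowx : PySem.List.pyGet? (pvPartial tl L i w x) (x : Int) = some "" := by
          rw [PySem.List.pyGet?_natCast,
            List.getElem?_eq_getElem (show x < (pvPartial tl L i w x).length by
              simp [pvPartial]; omega)]
          simp [pvPartial]
        rw [pvInnerA]
        simp only [hgetc, hgeti, Option.bind_some, hrowx, beq_self_eq_true, if_true]
        have heq : pvPartial tl L i w x = pvRow tl L i w := by
          apply pvPartial_eq_row
          intro j hj
          constructor
          · exact hinv j
          · intro hc
            by_contra hjx
            have hjx' : x ≤ j := by omega
            have : i + (x : Int) * L ≤ i + (j : Int) * L := by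
              have : (x : Int) * L ≤ (j : Int) * L := by
                have : (x : Int) ≤ (j : Int) := by exact_mod_cast hjx'
                nlinarith
              omega
            omega
        exact (pvSet_self g i.toNat _ (heq ▸ hg)).symm
    · -- range already empty
      rw [pvRange_pos_nil _ _ _ (by omega) (by omega)]
      rw [pvInnerA]
      have heq : pvPartial tl L i w x = pvRow tl L i w := by
        apply pvPartial_eq_row
        intro j hj
        constructor
        · exact hinv j
        · intro hc
          by_contra hjx
          have hjx' : x ≤ j := by omega
          have : i + (x : Int) * L ≤ i + (j : Int) * L := by
            have h2 : (x : Int) * L ≤ (j : Int) * L := by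
              have : (x : Int) ≤ (j : Int) := by exact_mod_cast hjx'
              nlinarith
            omega
          omega
      exact (pvSet_self g i.toNat _ (heq ▸ hg)).symm


lemma pvOuter_spec (tl : List Char) (L : Int) (hL : 1 ≤ L) :
    ∀ (fuel m : Nat) (g : List (List String)),
      L.toNat - m ≤ fuel →
      g.length = L.toNat →
      (∀ k : Nat, m ≤ k → k < L.toNat →
        g[k]? = some (List.replicate (tl.length / L.toNat + 1) "")) →
      ((PySem.List.pyRange (m : Int) L 1).foldl
          (fun g i => pvInnerA tl i (PySem.List.pyRange i ((tl.length : Int) + 1) L) g 0) g).length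
        = L.toNat ∧
      ∀ k : Nat, k < L.toNat →
        ((PySem.List.pyRange (m : Int) L 1).foldl
            (fun g i => pvInnerA tl i (PySem.List.pyRange i ((tl.length : Int) + 1) L) g 0) g)[k]?
          = if k < m then g[k]? else some (pvRow tl L (k : Int) (tl.length / L.toNat + 1)) := by
  intro fuel
  have hLn : (L.toNat : Int) = L := Int.toNat_of_nonneg (by omega)
  induction fuel with
  | zero =>
    intro m g hfuel hlen hrows
    have hml : L ≤ (m : Int) := by
      have h1 : L.toNat ≤ m := by omega
      have h2 : ((L.toNat : Nat) : Int) ≤ ((m : Nat) : Int) := by exact_mod_cast h1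
      omega
    rw [PySem.List.pyRange_one_eq_nil hml]
    exact ⟨hlen, fun k hk => by rw [List.foldl_nil, if_pos (by omega)]⟩
  | succ fuel ih =>
    intro m g hfuel hlen hrows
    by_cases hm : m < L.toNat
    · have hmL : (m : Int) < L := by
        have h2 : ((m : Nat) : Int) < ((L.toNat : Nat) : Int) := by exact_mod_cast hm
        omega
      rw [PySem.List.pyRange_one_cons hmL, List.foldl_cons]
      have hpart0 : pvPartial tl L (m : Int) (tl.length / L.toNat + 1) 0
          = List.replicate (tl.length / L.toNat + 1) "" := by
        simp [pvPartial]
      have hstep : pvInnerA tl (m : Int)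
            (PySem.List.pyRange (m : Int) ((tl.length : Int) + 1) L) g 0
          = g.set m (pvRow tl L (m : Int) (tl.length / L.toNat + 1)) := by
        have h0 : ((m : Int)) = (m : Int) + ((0 : Nat) : Int) * L := by push_cast; ring
        have hrow : g[((m : Int)).toNat]?
            = some (pvPartial tl L (m : Int) (tl.length / L.toNat + 1) 0) := by
          rw [Int.toNat_natCast, hpart0]
          exact hrows m (le_refl m) hm
        have hfu : tl.length / L.toNat + 1 - 0 ≤ tl.length / L.toNat + 1 := Nat.sub_le _ _
        have hmi : (0 : Int) ≤ (m : Int) := by omega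
        have := pvInner_spec tl L (m : Int) hL hmi (tl.length / L.toNat + 1) 0 g
          hfu hrow (by intro j hj; omega)
        rw [Int.toNat_natCast] at this
        conv_lhs => rw [h0]
        simpa using this
      rw [hstep]
      have hmlen : m < g.length := by omega
      obtain ⟨ihlen, ihget⟩ := ih (m + 1) (g.set m (pvRow tl L (m : Int) (tl.length / L.toNat + 1)))
        (by omega) (by simpa using hlen)
        (by intro k hk1 hk2
            rw [List.getElem?_set_ne (by omega)]
            exact hrows k (by omega) hk2)
      have hcast : ((m : Int) + 1) = (((m + 1 : Nat) : Nat) : Int) := by push_cast; ring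
      rw [hcast]
      refine ⟨ihlen, ?_⟩
      intro k hk
      rw [ihget k hk]
      by_cases hk1 : k < m
      · rw [if_pos (by omega), if_pos hk1, List.getElem?_set_ne (by omega)]
      · by_cases hk2 : k = m
        · subst hk2
          rw [if_pos (by omega), if_neg (by omega), List.getElem?_set_self hmlen]
        · rw [if_neg (by omega), if_neg (by omega)]
    · have hml : L ≤ (m : Int) := by
        have h2 : ((L.toNat : Nat) : Int) ≤ ((m : Nat) : Int) := by
          exact_mod_cast (by omega : L.toNat ≤ m)
        omega
      rw [PySem.List.pyRange_one_eq_nil hml]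
      exact ⟨hlen, fun k hk => by rw [List.foldl_nil, if_pos (by omega)]⟩

-- mapping the one-char-string constructor over a filterMap whose hits are total
lemma pvMap_filterMap (l : List Nat) (f : Nat → Option Char) (g : Nat → String)
    (h : ∀ k ∈ l, ∃ c, f k = some c ∧ String.ofList [c] = g k) :
    (l.filterMap f).map (fun c => String.ofList [c]) = l.map g := by
  induction l with
  | nil => rfl
  | cons a t ih =>
    obtain ⟨c, hc, hg⟩ := h a List.mem_cons_self
    rw [List.filterMap_cons, hc, List.map_cons, List.map_cons, hg,
      ih (fun k hk => h k (List.mem_cons_of_mem a hk))]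

-- B's padded slice row equals the finished row pvRow
lemma pvSliceRow (tl : List Char) (L i : Int) (hL : 1 ≤ L) (hi : 0 ≤ i) :
    (((PySem.List.slice? tl (some i) none L).getD []).map (fun c => String.ofList [c]))
      ++ List.replicate
        ((((tl.length / L.toNat + 1 : Nat) : Int))
          - ((((PySem.List.slice? tl (some i) none L).getD []).map
              (fun c => String.ofList [c])).length : Int)).toNat ""
    = pvRow tl L i (tl.length / L.toNat + 1) := by
  set n := tl.length with hn
  set w : Nat := n / L.toNat + 1 with hw
  have hLt : 0 < L.toNat := by omega
  have hLn : (L.toNat : Int) = L := Int.toNat_of_nonneg (by omega)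
  have hnd : ((n : Int)) / L = ((n / L.toNat : Nat) : Int) := by
    conv_lhs => rw [← hLn]
    exact (Int.natCast_ediv n L.toNat).symm
  by_cases hin : i < (n : Int)
  · -- start = i, count m = ((n - i + L - 1) / L).toNat
    set mI : Int := ((n : Int) - i + L - 1) / L with hmI
    have hmI1 : 1 ≤ mI := (Int.le_ediv_iff_mul_le (by omega)).2 (by omega)
    set m : Nat := mI.toNat with hm
    have hmc : (m : Int) = mI := Int.toNat_of_nonneg (by omega)
    -- the key index bracket: k < m ↔ i + L*k < n  (for any Nat k)
    have hidx : ∀ k : Nat, k < m ↔ i + L * (k : Int) < (n : Int) := by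
      intro k
      constructor
      · intro hk
        have hk' : (k : Int) + 1 ≤ mI := by omega
        have := (Int.le_ediv_iff_mul_le (show (0:Int) < L by omega)).1 hk'
        nlinarith
      · intro hk
        have : (k : Int) + 1 ≤ mI := by
          rw [hmI]
          exact (Int.le_ediv_iff_mul_le (show (0:Int) < L by omega)).2 (by nlinarith)
        omega
    have hmw : m ≤ w := by
      have e1 : mI ≤ ((n : Int) + L - 1) / L := Int.ediv_le_ediv (by omega) (by omega)
      have e2 : ((n : Int) + L - 1) / L = ((n : Int) - 1) / L + 1 := by
        rw [show (n : Int) + L - 1 = ((n : Int) - 1) + 1 * L by ring,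
          Int.add_mul_ediv_right _ _ (by omega : L ≠ 0)]
      have e3 : ((n : Int) - 1) / L ≤ (n : Int) / L := Int.ediv_le_ediv (by omega) (by omega)
      rw [hnd] at e3
      omega
    -- unfold the slice
    have hslice : PySem.List.slice? tl (some i) none L
        = some (List.filterMap (fun (k : Nat) => tl[(i + L * (k : Int)).toNat]?) (List.range m)) := by
      rw [PySem.List.slice?]
      rw [if_neg (by omega : ¬ L = 0)]
      simp only [PySem.List.sliceIndices]
      rw [if_neg (by omega : ¬ L < 0), if_neg (by omega : ¬ L < 0), if_neg (by omega : ¬ L < 0),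
        if_neg (by omega : ¬ i < 0)]
      rw [if_pos (by omega : 0 < L), if_pos (by omega : min i (n : Int) < (n : Int))]
      have hmini : min i (n : Int) = i := by omega
      rw [hmini]
    rw [hslice, Option.getD_some]
    have hmap : (List.filterMap (fun (k : Nat) => tl[(i + L * (k : Int)).toNat]?) (List.range m)).map
          (fun c => String.ofList [c])
        = (List.range m).map (fun (k : Nat) => pvChAt tl (i + (k : Int) * L)) := by
      apply pvMap_filterMap
      intro k hk
      rw [List.mem_range] at hk
      have hlt : i + L * (k : Int) < (n : Int) := (hidx k).1 hk
      have htn : (i + L * (k : Int)).toNat < n := by omega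
      refine ⟨tl[(i + L * (k : Int)).toNat]'htn, List.getElem?_eq_getElem htn, ?_⟩
      have hcast : i + (k : Int) * L = (((i + L * (k : Int)).toNat : Nat) : Int) := by
        rw [Int.toNat_of_nonneg (by positivity)]; ring
      rw [pvChAt, hcast, PySem.List.pyGet?_natCast, List.getElem?_eq_getElem htn]
      rfl
    rw [hmap]
    have hlenm : ((List.range m).map (fun (k : Nat) => pvChAt tl (i + (k : Int) * L))).length = m := by
      simp
    rw [hlenm]
    have hpad : (((w : Nat) : Int) - (m : Int)).toNat = w - m := by omega
    rw [hpad]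
    -- split pvRow at m
    unfold pvRow
    have hsplit : w = m + (w - m) := by omega
    conv_rhs => rw [hsplit, List.range_add, List.map_append]
    congr 1
    · apply List.map_congr_left
      intro k hk
      rw [List.mem_range] at hk
      rw [if_pos (by rw [mul_comm]; exact (hidx k).1 hk)]
    · rw [List.map_map]
      symm
      rw [List.eq_replicate_iff]
      refine ⟨by simp, ?_⟩
      intro b hb
      rw [List.mem_map] at hb
      obtain ⟨t, ht, hbt⟩ := hb
      rw [← hbt]
      simp only [Function.comp]
      rw [if_neg]
      intro hc
      rw [mul_comm] at hc
      have := (hidx (m + t)).2 hc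
      omega
  · -- i ≥ n: the slice is empty, the row is all padding
    have hslice : PySem.List.slice? tl (some i) none L = some [] := by
      rw [PySem.List.slice?]
      rw [if_neg (by omega : ¬ L = 0)]
      simp only [PySem.List.sliceIndices]
      rw [if_neg (by omega : ¬ L < 0), if_neg (by omega : ¬ L < 0), if_neg (by omega : ¬ L < 0),
        if_neg (by omega : ¬ i < 0)]
      rw [if_pos (by omega : 0 < L), if_neg (by omega : ¬ min i (n : Int) < (n : Int))]
      rfl
    rw [hslice, Option.getD_some, List.map_nil, List.nil_append]
    simp only [List.length_nil, Nat.cast_zero, sub_zero, Int.toNat_natCast]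
    symm
    rw [List.eq_replicate_iff]
    refine ⟨by simp [pvRow], ?_⟩
    intro b hb
    rw [pvRow, List.mem_map] at hb
    obtain ⟨j, hj, hbj⟩ := hb
    rw [← hbj, if_neg]
    have hjL : (0 : Int) ≤ (j : Int) * L := by positivity
    have hni : (n : Int) ≤ i := not_lt.1 hin
    intro hc
    linarith

lemma pvAB_eq (text : String) (L : Int) : splitTextToGroup text L = splitTextToGroup_alt text L := by
  have hA : splitTextToGroup text L
      = (PySem.List.pyRange 0 L 1).foldl
          (fun g i => pvInnerA text.toList i
            (PySem.List.pyRange i ((text.toList.length : Int) + 1) L) g 0)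
          ((List.replicate L.toNat (0 : Int)).map
            (fun _ => List.replicate
              (PySem.Int.floordiv (text.toList.length : Int) L + 1).toNat "")) := rfl
  have hB : splitTextToGroup_alt text L
      = ((PySem.List.pyRange 0 L 1).map (fun i =>
          ((PySem.List.slice? text.toList (some i) none L).getD []).map
            (fun c => String.ofList [c]))).map (fun row =>
          row ++ List.replicate
            (PySem.Int.floordiv (text.toList.length : Int) L + 1 - (row.length : Int)).toNat "") := rfl
  rw [hA, hB]
  by_cases hL : 1 ≤ L
  · have hLn : (L.toNat : Int) = L := Int.toNat_of_nonneg (by omega)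
    have hfd : PySem.Int.floordiv (text.toList.length : Int) L
        = ((text.toList.length / L.toNat : Nat) : Int) := by
      conv_lhs => rw [← hLn]
      rw [PySem.Int.floordiv_natCast]
    have hwcast : PySem.Int.floordiv (text.toList.length : Int) L + 1
        = ((text.toList.length / L.toNat + 1 : Nat) : Int) := by
      rw [hfd]; push_cast; ring
    have hg0 : (List.replicate L.toNat (0 : Int)).map
        (fun _ => List.replicate (PySem.Int.floordiv (text.toList.length : Int) L + 1).toNat "")
        = List.replicate L.toNat (List.replicate (text.toList.length / L.toNat + 1) "") := by
      rw [List.map_replicate, hwcast, Int.toNat_natCast]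
    rw [hg0]
    obtain ⟨hAlen, hAget⟩ := pvOuter_spec text.toList L hL L.toNat 0
      (List.replicate L.toNat (List.replicate (text.toList.length / L.toNat + 1) ""))
      (by omega) (by simp)
      (by intro k _ hk; simp [hk])
    have h0 : ((0 : Nat) : Int) = (0 : Int) := by norm_num
    rw [h0] at hAget hAlen
    apply List.ext_getElem?
    intro k
    by_cases hk : k < L.toNat
    · rw [hAget k hk, if_neg (by omega)]
      rw [PySem.List.pyRange_zero L, List.map_map, List.map_map, List.getElem?_map,
        List.getElem?_range]
      simp only [Option.map_some, Function.comp]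
      rw [hwcast]
      exact congrArg some
        (pvSliceRow text.toList L (k : Int) hL (by omega)).symm
      exact hk
    · rw [List.getElem?_eq_none (by rw [hAlen]; omega),
        List.getElem?_eq_none]
      simp only [List.length_map, PySem.List.pyRange_zero L, List.length_range]
      omega
  · have hL0 : L ≤ 0 := by omega
    rw [PySem.List.pyRange_one_eq_nil hL0, Int.toNat_of_nonpos hL0]
    simp

-- ===== VERDICT (by name: the statement is the Claim_ definition above) =====
theorem splitTextToGroup_spec : Claim_equal_splitTextToGroup := by
  intro text length_of_key _
  unfold Spec_splitTextToGroup
  exact pvAB_eq text length_of_key
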